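-- pv_equiv track=rewrite | github.com/CattoLoaffu/2565-Algorithm | Lab7/t3.py | horspoolMatching
-- ===== SOURCE A (Python) =====
-- def shiftTable(p):
--     m = len(p)
--     revp = p[::-1]
--     revp = revp[1:]
--     dictA = {}
--     for i in range(m):
--         if revp.find(p[i]) > -1:
--             dictA[p[i]] = revp.find(p[i])+1
--     return dictA
--
-- def horspoolMatching(p,t):
--     m = len(p)
--     n = len(t)
--     table = shiftTable(p)
--     i = m
--     while i <= n-1 :
--         k = 0
--         while k <= m-1 and p[m-1-k] == t[i-k]:
--             k += 1
--         if k == m: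
--             return i-m+1
--         else :
--             if t[i] in table.keys():
--                 i += table[t[i]]
--             else :
--                 i += m
--     return -1
-- ===== SOURCE B (Python) =====
-- def horspoolMatching(p, t):
--     # Simpler: direct first-occurrence scan with slice comparison, no shift table.
--     m = len(p)
--     n = len(t)
--     for j in range(n - m + 1):
--         if t[j:j+m] == p:
--             return j
--     return -1
-- ===== Notes on version B (the rewrite author's own statement) =====
-- stated objective: simpler
-- what changed: Replaced the Horspool shift-table search (reversed-pattern dict of skip distances, backward per-character comparison loop, data-driven jumps) by a plain left-to-right scan of all start positions with one slice comparison each; B also starts at position 0, fixing A's missed match at the start.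
-- intended difference: On inputs where t starts with p (including empty p), A never reports the match at index 0 because its alignment pointer starts one position too far, returning -1 or a later index (1 for empty p on nonempty t), while B returns 0, the first occurrence a substring search is meant to report. — e.g. on horspoolMatching("a", "ab"): A returns -1, B returns 0
import Mathlib
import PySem

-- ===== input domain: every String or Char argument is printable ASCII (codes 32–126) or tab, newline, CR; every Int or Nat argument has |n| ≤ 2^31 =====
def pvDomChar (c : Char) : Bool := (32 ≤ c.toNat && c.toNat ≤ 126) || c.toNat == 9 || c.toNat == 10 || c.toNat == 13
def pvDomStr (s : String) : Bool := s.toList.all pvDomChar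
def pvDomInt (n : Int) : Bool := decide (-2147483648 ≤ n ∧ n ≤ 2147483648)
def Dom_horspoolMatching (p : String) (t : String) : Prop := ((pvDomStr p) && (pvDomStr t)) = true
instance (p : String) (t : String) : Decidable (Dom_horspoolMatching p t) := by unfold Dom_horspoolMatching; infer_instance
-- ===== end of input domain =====

-- B replaces A's Horspool shift-table search by a plain left-to-right scan of the start
-- positions (simpler); on inputs where t starts with p, A misses the index-0 match (D_ below).


-- ===== PORT A =====
-- shiftTable(p): revp = p[::-1] then revp[1:]; dict keyed by p[i] with value revp.find(p[i])+1
def shiftTableA (P : List Char) : PySem.Dict Char Int :=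
  let m := P.length
  let revp0 := (PySem.List.slice? P none none (-1)).getD []   -- p[::-1] (never none for step -1)
  let revp := PySem.List.slice revp0 (some 1) none            -- revp[1:]
  (PySem.List.pyRange 0 (m : Int) 1).foldl
    (fun d i =>
      let c := PySem.List.pyGetD P i ' '
      if PySem.Chars.find revp [c] > -1 then d.insert c (PySem.Chars.find revp [c] + 1) else d)
    PySem.Dict.empty

-- inner while loop: k = 0; while k <= m-1 and p[m-1-k] == t[i-k]: k += 1
-- (structural on a fuel counter; P.length + 1 steps always suffice, proved in hsK_iff below)
def hsK (P T : List Char) (i : Int) (fuel : Nat) (k : Nat) : Nat :=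
  match fuel with
  | 0 => k
  | fuel + 1 =>
      if (k : Int) ≤ (P.length : Int) - 1 ∧
          PySem.List.pyGetD P ((P.length : Int) - 1 - k) ' ' = PySem.List.pyGetD T (i - k) ' ' then
        hsK P T i fuel (k + 1)
      else k

-- outer while loop: while i <= n-1: … (i advances by the looked-up shift, or by m;
-- structural on a fuel counter: every shift is ≥ 1, so T.length + 1 steps suffice — proved below)
def hsLoop (P T : List Char) (table : PySem.Dict Char Int) (fuel : Nat) (i : Int) : Int :=
  match fuel with
  | 0 => -1
  | fuel + 1 =>
      if i ≤ (T.length : Int) - 1 then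
        if hsK P T i (P.length + 1) 0 = P.length then i - P.length + 1
        else
          match table.get? (PySem.List.pyGetD T i ' ') with
          | some v => hsLoop P T table fuel (i + v)
          | none => hsLoop P T table fuel (i + P.length)
      else -1

def horspoolMatching (p : String) (t : String) : Int :=
  hsLoop p.toList t.toList (shiftTableA p.toList) (t.toList.length + 1)
    (p.toList.length : Int)

-- ===== PORT B =====
-- for j in range(n-m+1): if t[j:j+m] == p: return j;  return -1
def horspoolMatching_alt (p : String) (t : String) : Int :=
  let P := p.toList
  let T := t.toList
  match (PySem.List.pyRange 0 ((T.length : Int) - (P.length : Int) + 1) 1).find?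
      (fun j => PySem.List.slice T (some j) (some (j + (P.length : Int))) == P) with
  | some j => j
  | none => -1

-- ===== PRECONDITION & SPEC =====
-- On inputs where t starts with p (including empty p), A misses the match at index 0 (its
-- alignment pointer starts one position past the first alignment) and returns -1 or a later
-- index, while B returns 0, the first occurrence a substring search is meant to report.
def D_horspoolMatching (p : String) (t : String) : Prop := p.toList <+: t.toList
instance (p : String) (t : String) : Decidable (D_horspoolMatching p t) := by
  unfold D_horspoolMatching; infer_instance

def Spec_horspoolMatching (p : String) (t : String) (out : Int) : Prop :=
  ¬ D_horspoolMatching p t → out = horspoolMatching_alt p t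
instance (p : String) (t : String) (out : Int) : Decidable (Spec_horspoolMatching p t out) := by
  unfold Spec_horspoolMatching; infer_instance

def pvDiffWitness_horspoolMatching : String × String := ("a", "ab")
def pvDiffWitnessOut_horspoolMatching : Int × Int := (-1, 0)

-- ===== CLAIM (what is proved, stated in full; the proofs are below) =====
def Claim_unchanged_horspoolMatching : Prop := ∀ (p : String) (t : String), Dom_horspoolMatching p t → Spec_horspoolMatching p t (horspoolMatching p t)
def Claim_changed_horspoolMatching : Prop := Dom_horspoolMatching (pvDiffWitness_horspoolMatching.1) (pvDiffWitness_horspoolMatching.2) ∧ D_horspoolMatching (pvDiffWitness_horspoolMatching.1) (pvDiffWitness_horspoolMatching.2) ∧ horspoolMatching (pvDiffWitness_horspoolMatching.1) (pvDiffWitness_horspoolMatching.2) = pvDiffWitnessOut_horspoolMatching.1 ∧ horspoolMatching_alt (pvDiffWitness_horspoolMatching.1) (pvDiffWitness_horspoolMatching.2) = pvDiffWitnessOut_horspoolMatching.2 ∧ pvDiffWitnessOut_horspoolMatching.1 ≠ pvDiffWitnessOut_horspoolMatching.2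
def Claim_exact_horspoolMatching : Prop := ∀ (p : String) (t : String), Dom_horspoolMatching p t → D_horspoolMatching p t → horspoolMatching p t ≠ horspoolMatching_alt p t

-- ===== LEMMAS AND PROOFS =====

-- generic invariant of the dict-building fold
theorem pvFoldInv {α : Type} (step : PySem.Dict Char Int → α → PySem.Dict Char Int)
    (Q : Char → Int → Prop)
    (hstep : ∀ d a c v, (step d a).get? c = some v → d.get? c = some v ∨ Q c v) :
    ∀ (l : List α) (d : PySem.Dict Char Int), (∀ c v, d.get? c = some v → Q c v) →
      ∀ c v, (l.foldl step d).get? c = some v → Q c v := by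
  intro l
  induction l with
  | nil => intro d hd c v h; exact hd c v h
  | cons a l ih =>
      intro d hd c v h
      refine ih (step d a) ?_ c v h
      intro c' v' h'
      rcases hstep d a c' v' h' with h'' | h''
      · exact hd c' v' h''
      · exact h''

-- every value stored by shiftTable is ≥ 1
theorem shiftTableA_pos (P : List Char) :
    ∀ c v, (shiftTableA P).get? c = some v → 1 ≤ v := by
  unfold shiftTableA
  refine pvFoldInv _ (fun _ v => 1 ≤ v) ?_ _ _ ?_
  · intro d a c v h
    dsimp only at h
    split at h
    · rw [PySem.Dict.get?_insert] at h
      split at h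
      · rename_i hgt _; cases h; right; omega
      · left; exact h
    · left; exact h
  · intro c v h
    rw [PySem.Dict.get?_empty] at h; cases h

-- the shiftTable fold over range(m) is a fold over the characters of p
theorem shiftTableA_eq (P : List Char) :
    shiftTableA P = P.foldl
      (fun d c => if PySem.Chars.find P.reverse.tail [c] > -1 then
          d.insert c (PySem.Chars.find P.reverse.tail [c] + 1) else d)
      PySem.Dict.empty := by
  unfold shiftTableA
  simp only [PySem.List.slice?_none_none_neg_one, Option.getD_some, PySem.List.slice_from_one]
  exact PySem.List.foldl_pyRange_zero_pyGetD' P ' '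
    (fun d c => if PySem.Chars.find P.reverse.tail [c] > -1 then
        d.insert c (PySem.Chars.find P.reverse.tail [c] + 1) else d) PySem.Dict.empty

theorem prefix_singleton_iff (l : List Char) (c : Char) : [c] <+: l ↔ l.head? = some c := by
  constructor
  · rintro ⟨r, rfl⟩; rfl
  · intro h; cases l with
    | nil => simp at h
    | cons a t => simp at h; subst h; exact ⟨t, rfl⟩

-- every stored value is exactly revp.find(c)+1 with the find successful
theorem shiftTableA_get_some (P : List Char) (c : Char) (v : Int)
    (h : (shiftTableA P).get? c = some v) :
    v = PySem.Chars.find P.reverse.tail [c] + 1 ∧ PySem.Chars.find P.reverse.tail [c] > -1 := by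
  rw [shiftTableA_eq] at h
  refine pvFoldInv _ (fun c v => v = PySem.Chars.find P.reverse.tail [c] + 1 ∧
    PySem.Chars.find P.reverse.tail [c] > -1) ?_ P _ ?_ c v h
  · intro d a c' v' h'
    split at h'
    · rw [PySem.Dict.get?_insert] at h'
      split at h'
      · rename_i hgt heq; subst heq; cases h'; right; exact ⟨rfl, hgt⟩
      · left; exact h'
    · left; exact h'
  · intro c' v' h'
    rw [PySem.Dict.get?_empty] at h'; cases h'

-- a character of p that occurs in revp is a key of the table
theorem tbl_isSome (P : List Char) (c : Char)
    (hfind : PySem.Chars.find P.reverse.tail [c] > -1) :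
    ∀ (l : List Char) (d : PySem.Dict Char Int), c ∈ l ∨ ((d.get? c).isSome) →
      (((l.foldl (fun d c => if PySem.Chars.find P.reverse.tail [c] > -1 then
          d.insert c (PySem.Chars.find P.reverse.tail [c] + 1) else d) d).get? c).isSome) := by
  intro l
  induction l with
  | nil =>
      intro d h
      rcases h with h | h
      · cases h
      · simpa using h
  | cons a l ih =>
      intro d h
      by_cases hac : c = a
      · subst hac
        refine ih _ (Or.inr ?_)
        simp only [if_pos hfind, PySem.Dict.get?_insert_self]
        rfl
      · refine ih _ ?_
        rcases h with h | h
        · rcases List.mem_cons.mp h with h' | h'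
          · exact absurd h'.symm (Ne.symm hac)
          · exact Or.inl h'
        · right
          dsimp only
          split
          · rw [PySem.Dict.get?_insert, if_neg hac]
            exact h
          · exact h

theorem revp_getElem? (P : List Char) (x : Nat) (h : x + 1 < P.length) :
    (P.reverse.tail)[x]? = P[P.length - 2 - x]? := by
  rw [← List.drop_one, List.getElem?_drop, List.getElem?_reverse (by omega)]
  congr 1; omega

theorem find_toNat_lt (s sub : List Char) (h : 0 ≤ PySem.Chars.find s sub) (hsub : sub ≠ []) :
    (PySem.Chars.find s sub).toNat < s.length := by
  by_contra hge
  have hnil : s.drop (PySem.Chars.find s sub).toNat = [] := by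
    rw [List.drop_eq_nil_iff]; omega
  have := (PySem.Chars.find_spec h).1
  rw [hnil, List.prefix_nil] at this
  exact hsub this

-- shift safety, table-hit case: no stored shift skips an occurrence of t[i] in the pattern
theorem skip_safe_some (P : List Char) (c : Char) (v : Int)
    (h : (shiftTableA P).get? c = some v) :
    (v ≤ (P.length : Int) - 1) ∧
      ∀ d : Nat, 1 ≤ d → (d : Int) < v → P[P.length - 1 - d]? ≠ some c := by
  obtain ⟨hv, hfind⟩ := shiftTableA_get_some P c v h
  have hrl : (P.reverse.tail).length = P.length - 1 := by simp
  have hfnn : 0 ≤ PySem.Chars.find P.reverse.tail [c] := by omega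
  have hflt := find_toNat_lt _ _ hfnn (by simp)
  constructor
  · omega
  · intro d hd1 hdv hPc
    have hnp := (PySem.Chars.find_spec hfnn).2 (d - 1) (by omega)
    apply hnp
    rw [prefix_singleton_iff, List.head?_drop, revp_getElem? P (d - 1) (by omega)]
    have e : P.length - 2 - (d - 1) = P.length - 1 - d := by omega
    rw [e]; exact hPc

-- shift safety, table-miss case: t[i] occurs nowhere in revp
theorem skip_safe_none (P : List Char) (c : Char)
    (h : (shiftTableA P).get? c = none) :
    ∀ d : Nat, 1 ≤ d → d < P.length → P[P.length - 1 - d]? ≠ some c := by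
  intro d h1 h2 hPc
  have hrev : (P.reverse.tail)[d - 1]? = some c := by
    rw [revp_getElem? P (d - 1) (by omega)]
    have e : P.length - 2 - (d - 1) = P.length - 1 - d := by omega
    rw [e]; exact hPc
  have hmem : c ∈ P.reverse.tail := List.mem_of_getElem? hrev
  have hfind : 0 ≤ PySem.Chars.find P.reverse.tail [c] :=
    (PySem.Chars.find_nonneg_iff _ _).mpr ((List.singleton_infix_iff c _).mpr hmem)
  have hcP : c ∈ P := List.mem_reverse.mp (List.mem_of_mem_tail hmem)
  have := tbl_isSome P c (by omega) P PySem.Dict.empty (Or.inl hcP)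
  rw [← shiftTableA_eq] at this
  rw [h] at this
  cases this

-- with enough fuel, hsK stays below fuel exhaustion and k reaches m iff all characters match
theorem hsK_le (P T : List Char) (i : Int) :
    ∀ (fuel k : Nat), k ≤ P.length → hsK P T i fuel k ≤ P.length := by
  intro fuel
  induction fuel with
  | zero => intro k hk; exact hk
  | succ fuel ih =>
      intro k hk
      simp only [hsK]
      split
      · rename_i h; exact ih (k + 1) (by omega)
      · exact hk

theorem hsK_iff (P T : List Char) (i : Int) :
    ∀ (fuel k : Nat), k ≤ P.length → P.length - k < fuel →
      (hsK P T i fuel k = P.length ↔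
        ∀ k' : Nat, k ≤ k' → k' < P.length →
          PySem.List.pyGetD P ((P.length : Int) - 1 - k') ' ' = PySem.List.pyGetD T (i - k') ' ') := by
  intro fuel
  induction fuel with
  | zero => intro k _ h; omega
  | succ fuel ih =>
      intro k hk hfuel
      simp only [hsK]
      split
      · rename_i h
        rw [ih (k + 1) (by omega) (by omega)]
        constructor
        · intro hall k' hk' hk'm
          rcases Nat.eq_or_lt_of_le hk' with rfl | hlt
          · exact h.2
          · exact hall k' hlt hk'm
        · intro hall k' hk' hk'm; exact hall k' (by omega) hk'm
      · rename_i h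
        rw [Decidable.not_and_iff_or_not] at h
        rcases h with h | h
        · have hkm : k = P.length := by omega
          subst hkm
          simp only [true_iff]
          intro k' h1 h2; omega
        · by_cases hkm : k = P.length
          · subst hkm
            constructor
            · intro _ k' h1 h2; omega
            · intro _; rfl
          · constructor
            · intro he; exact absurd he hkm
            · intro hall; exact absurd (hall k le_rfl (by omega)) h

-- full alignment ending at i ⟺ slice match at start i-m+1
theorem match_iff (P T : List Char) (i : Int) (hm : 1 ≤ P.length)
    (hi : (P.length : Int) ≤ i) (hn : i ≤ (T.length : Int) - 1) :
    ((T.drop (i - (P.length : Int) + 1).toNat).take P.length = P ↔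
      ∀ k' : Nat, 0 ≤ k' → k' < P.length →
        PySem.List.pyGetD P ((P.length : Int) - 1 - k') ' ' = PySem.List.pyGetD T (i - k') ' ') := by
  set m := P.length with hmdef
  set n := T.length with hndef
  set j := (i - (m : Int) + 1).toNat with hjdef
  have hj : (j : Int) = i - m + 1 := by omega
  have hjm : j + m ≤ n := by omega
  constructor
  · intro h k' _ hk'
    have h1 : PySem.List.pyGetD P ((m : Int) - 1 - k') ' ' = P[m - 1 - k']'(by omega) := by
      rw [PySem.List.pyGetD_eq_getElem _ _ (by omega) (by omega)]
      congr 1; omega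
    have h2 : PySem.List.pyGetD T (i - k') ' ' = T[j + (m - 1 - k')]'(by omega) := by
      rw [PySem.List.pyGetD_eq_getElem _ _ (by omega) (by omega)]
      congr 1; omega
    rw [h1, h2]
    have := congrArg (fun l => l[m - 1 - k']?) h
    simp only [List.getElem?_take_of_lt (by omega : m - 1 - k' < m), List.getElem?_drop] at this
    rw [List.getElem?_eq_getElem (by omega), List.getElem?_eq_getElem (by omega)] at this
    exact (Option.some.inj this).symm
  · intro h
    apply List.ext_getElem
    · simp; omega
    · intro x hx1 hx2
      have hxm : x < m := by simpa using hx2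
      have h1 := h (m - 1 - x) (by omega) (by omega)
      rw [PySem.List.pyGetD_eq_getElem _ _ (by omega) (by omega),
          PySem.List.pyGetD_eq_getElem _ _ (by omega) (by omega)] at h1
      have e1 : ((m : Int) - 1 - ((m - 1 - x : Nat) : Int)).toNat = x := by omega
      have e2 : (i - ((m - 1 - x : Nat) : Int)).toNat = j + x := by omega
      have h1' : P[((m : Int) - 1 - ((m - 1 - x : Nat) : Int)).toNat]? =
          T[(i - ((m - 1 - x : Nat) : Int)).toNat]? := by
        rw [List.getElem?_eq_getElem (by omega), List.getElem?_eq_getElem (by omega), h1]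
      rw [e1, e2] at h1'
      rw [List.getElem?_eq_getElem (by omega), List.getElem?_eq_getElem (by omega)] at h1'
      simp only [List.getElem_take, List.getElem_drop]
      exact (Option.some.inj h1').symm

-- a slice match at start i-m+1+d forces pattern character m-1-d to equal t[i]
theorem match_forces (P T : List Char) (i : Int) (hm : 1 ≤ P.length)
    (hi : (P.length : Int) ≤ i) (hn : i ≤ (T.length : Int) - 1) (d : Nat) (hd : d < P.length)
    (hmt : (T.drop (i - (P.length : Int) + 1 + d).toNat).take P.length = P) :
    P[P.length - 1 - d]? = some (PySem.List.pyGetD T i ' ') := by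
  set m := P.length with hmdef
  have := congrArg (fun l => l[m - 1 - d]?) hmt
  simp only [List.getElem?_take_of_lt (by omega : m - 1 - d < m), List.getElem?_drop] at this
  have e : (i - (m : Int) + 1 + d).toNat + (m - 1 - d) = i.toNat := by omega
  rw [e] at this
  rw [← this, PySem.List.pyGetD_eq_getElem _ _ (by omega) (by omega),
    List.getElem?_eq_getElem (by omega)]

-- B's scan, written as a recursion on the start position (proof-side view of port B)
def altLoop (P T : List Char) (j : Int) : Int :=
  if h : j < (T.length : Int) - (P.length : Int) + 1 then
    if PySem.List.slice T (some j) (some (j + (P.length : Int))) = P then j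
    else altLoop P T (j + 1)
  else -1
termination_by ((T.length : Int) - (P.length : Int) + 1 - j).toNat
decreasing_by omega

theorem pyRange_one_nil (a b : Int) (h : b ≤ a) : PySem.List.pyRange a b 1 = [] := by
  rw [PySem.List.pyRange_one]
  have : (b - a).toNat = 0 := by omega
  rw [this]; rfl

-- port B (find? over range) computes altLoop
theorem find?_eq_altLoop (P T : List Char) :
    ∀ (N : Nat) (j : Int), 0 ≤ j → ((T.length : Int) - (P.length : Int) + 1 - j).toNat ≤ N →
      (match (PySem.List.pyRange j ((T.length : Int) - (P.length : Int) + 1) 1).find?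
          (fun x => PySem.List.slice T (some x) (some (x + (P.length : Int))) == P) with
        | some x => x
        | none => -1) = altLoop P T j := by
  intro N
  induction N with
  | zero =>
      intro j h0 hN
      rw [pyRange_one_nil _ _ (by omega), altLoop, dif_neg (by omega)]
      rfl
  | succ N ih =>
      intro j h0 hN
      by_cases h : j < (T.length : Int) - (P.length : Int) + 1
      · rw [PySem.List.pyRange_one_cons h, List.find?_cons]
        by_cases hs : PySem.List.slice T (some j) (some (j + (P.length : Int))) = P
        · rw [beq_iff_eq.mpr hs, altLoop, dif_pos h, if_pos hs]
        · rw [beq_eq_false_iff_ne.mpr hs, altLoop, dif_pos h, if_neg hs]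
          exact ih (j + 1) (by omega) (by omega)
      · rw [pyRange_one_nil _ _ (by omega), altLoop, dif_neg (by omega)]
        rfl

theorem alt_eq_altLoop (p t : String) :
    horspoolMatching_alt p t = altLoop p.toList t.toList 0 := by
  rw [horspoolMatching_alt]
  exact find?_eq_altLoop p.toList t.toList
    ((t.toList.length : Int) - p.toList.length + 1).toNat 0 le_rfl (by omega)

theorem slice_eq_take_drop (T P : List Char) (j : Int) (hj : 0 ≤ j) :
    PySem.List.slice T (some j) (some (j + (P.length : Int))) = (T.drop j.toNat).take P.length := by
  rw [PySem.List.slice_toNat T hj (by omega)]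
  congr 1; omega

theorem altLoop_stop (P T : List Char) (j : Int)
    (h : (T.length : Int) - (P.length : Int) + 1 ≤ j) : altLoop P T j = -1 := by
  rw [altLoop]; rw [dif_neg (by omega)]

theorem altLoop_hit (P T : List Char) (j : Int) (h0 : 0 ≤ j)
    (h : j < (T.length : Int) - (P.length : Int) + 1)
    (hm : (T.drop j.toNat).take P.length = P) : altLoop P T j = j := by
  rw [altLoop, dif_pos h, if_pos (by rw [slice_eq_take_drop T P j h0]; exact hm)]

theorem altLoop_skip (P T : List Char) (j : Int) (h0 : 0 ≤ j)
    (hm : (T.drop j.toNat).take P.length ≠ P) : altLoop P T j = altLoop P T (j + 1) := by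
  by_cases h : j < (T.length : Int) - (P.length : Int) + 1
  · rw [altLoop, dif_pos h, if_neg (by rw [slice_eq_take_drop T P j h0]; exact hm)]
  · rw [altLoop_stop P T j (by omega), altLoop_stop P T (j + 1) (by omega)]

theorem altLoop_skip_many (P T : List Char) (j : Int) (h0 : 0 ≤ j) :
    ∀ s : Nat, (∀ d : Nat, d < s → (T.drop (j + d).toNat).take P.length ≠ P) →
      altLoop P T j = altLoop P T (j + s) := by
  intro s
  induction s generalizing j with
  | zero => intro _; norm_num
  | succ s ih =>
      intro h
      have h1 : altLoop P T j = altLoop P T (j + 1) := by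
        refine altLoop_skip P T j h0 ?_
        have := h 0 (by omega)
        simpa using this
      rw [h1, ih (j + 1) (by omega) ?_]
      · congr 1; push_cast; ring
      · intro d hd
        have := h (d + 1) (by omega)
        have e : j + 1 + (d : Int) = j + ((d + 1 : Nat) : Int) := by push_cast; ring
        rw [e]; exact this

-- the Horspool loop from alignment end i equals the plain scan from start i-m+1
theorem main_loop_eq (P T : List Char) :
    ∀ (fuel : Nat) (i : Int), ((T.length : Int) - i).toNat < fuel →
      1 ≤ P.length → (P.length : Int) ≤ i →
      hsLoop P T (shiftTableA P) fuel i = altLoop P T (i - P.length + 1) := by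
  intro fuel
  induction fuel with
  | zero => intro i h _ _; omega
  | succ fuel ih =>
      intro i hN hm hi
      simp only [hsLoop]
      by_cases hcond : i ≤ (T.length : Int) - 1
      case neg =>
        rw [if_neg hcond, altLoop_stop P T _ (by omega)]
      case pos =>
      rw [if_pos hcond]
      by_cases hk : hsK P T i (P.length + 1) 0 = P.length
      · rw [if_pos hk]
        have hmatch : (T.drop (i - (P.length : Int) + 1).toNat).take P.length = P :=
          (match_iff P T i hm hi hcond).mpr
            (fun k' h1 h2 =>
              ((hsK_iff P T i (P.length + 1) 0 (by omega) (by omega)).mp hk) k' (by omega) h2)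
        rw [altLoop_hit P T _ (by omega) (by omega) hmatch]
      · rw [if_neg hk]
        have hnom : ∀ d : Nat, d < P.length →
            ¬ P[P.length - 1 - d]? = some (PySem.List.pyGetD T i ' ') →
            ¬ (T.drop (i - (P.length : Int) + 1 + d).toNat).take P.length = P := by
          intro d hdm hne hmt
          exact hne (match_forces P T i hm hi hcond d hdm hmt)
        have hnomatch0 : ¬ (T.drop (i - (P.length : Int) + 1).toNat).take P.length = P := by
          intro hmt
          exact hk ((hsK_iff P T i (P.length + 1) 0 (by omega) (by omega)).mpr
            (fun k' _ h2 => (match_iff P T i hm hi hcond).mp hmt k' (Nat.zero_le _) h2))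
        split
        case h_1 v htv =>
          obtain ⟨hvle, hsafe⟩ := skip_safe_some P _ v htv
          have hv1 : 1 ≤ v := shiftTableA_pos P _ v htv
          have hrec := ih (i + v) (by omega) hm (by omega)
          rw [hrec]
          have hskip := altLoop_skip_many P T (i - P.length + 1) (by omega) v.toNat ?_
          · rw [hskip]; congr 1; omega
          · intro d hd
            rcases Nat.eq_zero_or_pos d with rfl | hd1
            · simpa using hnomatch0
            · exact hnom d (by omega) (hsafe d hd1 (by omega))
        case h_2 htv =>
          have hrec := ih (i + P.length) (by omega) hm (by omega)
          rw [hrec]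
          have hskip := altLoop_skip_many P T (i - P.length + 1) (by omega) P.length ?_
          · rw [hskip]; congr 1; omega
          · intro d hd
            rcases Nat.eq_zero_or_pos d with rfl | hd1
            · simpa using hnomatch0
            · exact hnom d (by omega) (skip_safe_none P _ htv d hd1 (by omega))

-- A's loop never returns 0: every reported index is i-m+1 ≥ 1
theorem hsLoop_ne_zero (P T : List Char) (table : PySem.Dict Char Int)
    (hpos : ∀ c v, table.get? c = some v → 1 ≤ v) :
    ∀ (fuel : Nat) (i : Int), (P.length : Int) ≤ i → hsLoop P T table fuel i ≠ 0 := by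
  intro fuel
  induction fuel with
  | zero => intro i _; simp only [hsLoop]; omega
  | succ fuel ih =>
      intro i hi
      simp only [hsLoop]
      by_cases hcond : i ≤ (T.length : Int) - 1
      case neg => rw [if_neg hcond]; omega
      case pos =>
      rw [if_pos hcond]
      by_cases hk : hsK P T i (P.length + 1) 0 = P.length
      · rw [if_pos hk]; omega
      · rw [if_neg hk]
        have hm1 : 1 ≤ P.length := by
          have := hsK_le P T i (P.length + 1) 0 (Nat.zero_le _)
          omega
        split
        case h_1 v htv =>
          have hv1 := hpos _ _ htv
          exact ih (i + v) (by omega)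
        case h_2 htv =>
          exact ih (i + P.length) (by omega)

-- ===== VERDICT (by name: the statement is the Claim_ definition above) =====
theorem horspoolMatching_spec : Claim_unchanged_horspoolMatching := by
  intro p t _ hD
  unfold D_horspoolMatching at hD
  have hm : 1 ≤ p.toList.length := by
    rcases Nat.eq_zero_or_pos p.toList.length with h | h
    · exact absurd (by rw [List.eq_nil_iff_length_eq_zero.mpr h]; exact List.nil_prefix) hD
    · exact h
  have hA := main_loop_eq p.toList t.toList (t.toList.length + 1)
    (p.toList.length : Int) (by omega) hm le_rfl
  have e1 : ((p.toList.length : Int) - p.toList.length + 1) = 1 := by ring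
  rw [e1] at hA
  have hskip : altLoop p.toList t.toList 0 = altLoop p.toList t.toList 1 := by
    refine altLoop_skip p.toList t.toList 0 le_rfl ?_
    intro ht
    exact hD (List.prefix_iff_eq_take.mpr (by simpa using ht.symm))
  rw [horspoolMatching, alt_eq_altLoop, hA, hskip]

theorem horspoolMatching_changed : Claim_changed_horspoolMatching := by
  unfold Claim_changed_horspoolMatching; decide

theorem horspoolMatching_tight : Claim_exact_horspoolMatching := by
  intro p t _ hD
  unfold D_horspoolMatching at hD
  have hpre : t.toList.take p.toList.length = p.toList := (List.prefix_iff_eq_take.mp hD).symm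
  have hmn : p.toList.length ≤ t.toList.length := hD.length_le
  have hB : horspoolMatching_alt p t = 0 := by
    rw [alt_eq_altLoop]
    exact altLoop_hit p.toList t.toList 0 le_rfl (by omega) (by simpa using hpre)
  rw [hB, horspoolMatching]
  exact hsLoop_ne_zero p.toList t.toList _ (shiftTableA_pos p.toList) _ _ le_rfl
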